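-- pv_equiv track=rewrite | github.com/lyuyunfang/Construction-of-varepsilon--nets-for-the-space-of-planar-convex-bodies | Generating_0.25_net.py | is_y_convex
-- ===== SOURCE A (Python) =====
-- def is_y_convex(S):
--     for i in range(-6, 7):
--         x_coords = [p[0] for p in S if p[1] == i]
--         if len(x_coords) >= 2:
--             lb, ub = min(x_coords), max(x_coords)
--             if ub - lb + 1 > len(x_coords):
--                 return False
--     return True
-- ===== SOURCE B (Python) =====
-- def is_y_convex(S):
--     # One grouping pass: y -> (min_x, max_x, count) for integer rows in -6..6,
--     # then a single contiguity check over the table.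
--     rows = {}
--     for x, y in [p for p in S if -6 <= p[1] <= 6]:
--         lo, hi, c = rows.get(y, (x, x, 0))
--         rows[y] = (min(lo, x), max(hi, x), c + 1)
--     return all(c < 2 or hi - lo + 1 <= c for lo, hi, c in rows.values())
-- ===== Notes on version B (the rewrite author's own statement) =====
-- stated objective: alternative
-- what changed: Replaces 13 full rescans of S (one per y in -6..6, each with filter/min/max) by a single grouping pass building a dict y -> (min_x, max_x, count), followed by one contiguity check over the table entries.
import Mathlib
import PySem

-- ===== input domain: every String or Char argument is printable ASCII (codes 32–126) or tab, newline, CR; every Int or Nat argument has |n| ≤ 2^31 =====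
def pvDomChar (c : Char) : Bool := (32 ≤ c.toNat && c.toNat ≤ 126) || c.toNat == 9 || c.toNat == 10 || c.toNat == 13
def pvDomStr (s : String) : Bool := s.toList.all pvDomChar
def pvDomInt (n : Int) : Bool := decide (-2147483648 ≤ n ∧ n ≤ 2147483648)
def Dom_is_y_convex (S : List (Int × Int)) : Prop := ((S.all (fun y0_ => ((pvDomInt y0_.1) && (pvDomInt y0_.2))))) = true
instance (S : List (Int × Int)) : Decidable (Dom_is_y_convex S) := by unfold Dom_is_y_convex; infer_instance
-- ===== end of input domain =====

-- B replaces A's 13 filtered rescans of S (one per y in -6..6) by a single grouping pass building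
-- a table y -> (min_x, max_x, count), then one contiguity check over the table entries.

-- ===== PORT A =====
-- the for-loop with its early 'return False', as structural recursion over the range list
def is_y_convex_loop (S : List (Int × Int)) : List Int → Bool
  | [] => true
  | i :: rest =>
    let x_coords := (S.filter (fun p => p.2 == i)).map (fun p => p.1)
    if 2 ≤ x_coords.length then
      -- min(x_coords)/max(x_coords): the list is nonempty under the length guard, so the
      -- catch-all (Python-raising) branch is unreachable
      match PySem.List.min? x_coords (fun x => x), PySem.List.max? x_coords (fun x => x) with
      | some lb, some ub =>
        if ub - lb + 1 > (x_coords.length : Int) then false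
        else is_y_convex_loop S rest
      | _, _ => is_y_convex_loop S rest
    else is_y_convex_loop S rest

def is_y_convex (S : List (Int × Int)) : Bool :=
  is_y_convex_loop S (PySem.List.pyRange (-6) 7 1)

-- ===== PORT B =====
-- loop body: rows[y] = (min(lo, x), max(hi, x), c + 1) with (lo, hi, c) = rows.get(y, (x, x, 0))
def bStep (d : PySem.Dict Int (Int × Int × Int)) (p : Int × Int) : PySem.Dict Int (Int × Int × Int) :=
  let t := d.getD p.2 (p.1, p.1, 0)
  d.insert p.2 (min t.1 p.1, max t.2.1 p.1, t.2.2 + 1)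

def is_y_convex_alt (S : List (Int × Int)) : Bool :=
  let rows := (S.filter (fun p => decide (-6 ≤ p.2 ∧ p.2 ≤ 6))).foldl bStep PySem.Dict.empty
  rows.values.all (fun t => t.2.2 < 2 || t.2.1 - t.1 + 1 ≤ t.2.2)

-- ===== PRECONDITION & SPEC =====
def Spec_is_y_convex (S : List (Int × Int)) (out : Bool) : Prop := out = is_y_convex_alt S
instance (S : List (Int × Int)) (out : Bool) : Decidable (Spec_is_y_convex S out) := by unfold Spec_is_y_convex; infer_instance

-- ===== CLAIM (what is proved, stated in full; the proofs are below) =====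
def Claim_equal_is_y_convex : Prop := ∀ (S : List (Int × Int)), Dom_is_y_convex S → Spec_is_y_convex S (is_y_convex S)

-- ===== LEMMAS AND PROOFS =====

def upd : Option (Int × Int × Int) → Int → Option (Int × Int × Int)
  | none, x => some (x, x, 1)
  | some t, x => some (min t.1 x, max t.2.1 x, t.2.2 + 1)

theorem get?_bStep (d : PySem.Dict Int (Int × Int × Int)) (p : Int × Int) (y : Int) :
    (bStep d p).get? y = if y = p.2 then upd (d.get? p.2) p.1 else d.get? y := by
  unfold bStep
  cases h : d.get? p.2 <;>
    simp [PySem.Dict.get?_insert, PySem.Dict.getD_eq_get?_getD, h, upd]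

theorem get?_foldl_bStep (l : List (Int × Int)) (d : PySem.Dict Int (Int × Int × Int)) (y : Int) :
    (l.foldl bStep d).get? y
      = ((l.filter (fun p => p.2 == y)).map (fun p => p.1)).foldl upd (d.get? y) := by
  induction l generalizing d with
  | nil => rfl
  | cons p l ih =>
    rw [List.foldl_cons, ih]
    by_cases h : p.2 = y
    · simp [List.filter_cons, h, get?_bStep]
    · simp [List.filter_cons, h, get?_bStep, Ne.symm h]

theorem foldl_upd_some (l : List Int) (lo hi c : Int) :
    l.foldl upd (some (lo, hi, c)) = some (l.foldl min lo, l.foldl max hi, c + l.length) := by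
  induction l generalizing lo hi c with
  | nil => simp
  | cons x t ih => simp [upd, ih]; ring


theorem foldl_upd_cons' (x : Int) (t : List Int) :
    (x :: t).foldl upd none = some (t.foldl min x, t.foldl max x, 1 + (t.length : Int)) := by
  rw [List.foldl_cons]
  show t.foldl upd (some (x, x, 1)) = _
  rw [foldl_upd_some]

-- row-badness predicate shared by both readings
def rowBad (S : List (Int × Int)) (i : Int) : Bool :=
  let xs := (S.filter (fun p => p.2 == i)).map (fun p => p.1)
  match PySem.List.min? xs (fun x => x), PySem.List.max? xs (fun x => x) with
  | some lb, some ub => decide (2 ≤ xs.length) && decide (ub - lb + 1 > (xs.length : Int))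
  | _, _ => false

theorem loop_cons (S : List (Int × Int)) (i : Int) (rest : List Int) :
    is_y_convex_loop S (i :: rest) = ((!rowBad S i) && is_y_convex_loop S rest) := by
  rw [is_y_convex_loop, rowBad]
  by_cases h2 : 2 ≤ ((S.filter (fun p => p.2 == i)).map (fun p => p.1)).length
  · rw [if_pos h2]
    cases hm : PySem.List.min? ((S.filter (fun p => p.2 == i)).map (fun p => p.1)) (fun x => x) <;>
      cases hM : PySem.List.max? ((S.filter (fun p => p.2 == i)).map (fun p => p.1)) (fun x => x) <;>
        simp only [hm, hM, Bool.not_false, Bool.true_and]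
    split_ifs with hcmp <;> simp [h2, hcmp] <;>
      simp only [List.length_map] at h2 hcmp ⊢ <;> intro h <;> omega
  · rw [if_neg h2]
    cases hm : PySem.List.min? ((S.filter (fun p => p.2 == i)).map (fun p => p.1)) (fun x => x) <;>
      cases hM : PySem.List.max? ((S.filter (fun p => p.2 == i)).map (fun p => p.1)) (fun x => x) <;>
        simp [hm, hM, h2] <;> simp only [List.length_map] at h2 <;> intro h <;> left <;> omega

theorem loop_eq_all (S : List (Int × Int)) (l : List Int) :
    is_y_convex_loop S l = l.all (fun i => !rowBad S i) := by
  induction l with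
  | nil => rfl
  | cons i rest ih => rw [loop_cons, ih, List.all_cons]

def Frows (S : List (Int × Int)) : List (Int × Int) :=
  S.filter (fun p => decide (-6 ≤ p.2 ∧ p.2 ≤ 6))

theorem filter_Frows (S : List (Int × Int)) (y : Int) (hy : -6 ≤ y ∧ y ≤ 6) :
    (Frows S).filter (fun p => p.2 == y) = S.filter (fun p => p.2 == y) := by
  unfold Frows
  rw [List.filter_filter]
  apply List.filter_congr
  intro p _
  by_cases h : p.2 = y
  · simp [h, hy.1, hy.2]
  · simp [h]

theorem foldl_bStep_eq (S : List (Int × Int)) (d : PySem.Dict Int (Int × Int × Int)) :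
    S.foldl bStep d = S.foldl (fun d p => d.insert p.2
      (min (d.getD p.2 (p.1, p.1, 0)).1 p.1, max (d.getD p.2 (p.1, p.1, 0)).2.1 p.1,
        (d.getD p.2 (p.1, p.1, 0)).2.2 + 1)) d := rfl

theorem keys_rows (S : List (Int × Int)) :
    ((Frows S).foldl bStep PySem.Dict.empty).keys = PySem.Set.ofList ((Frows S).map (fun p => p.2)) := by
  rw [foldl_bStep_eq, PySem.Dict.keys_foldl_insert_key, PySem.Dict.keys_empty,
    PySem.Set.update_nil_left]

theorem nodup_keys_rows (S : List (Int × Int)) :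
    ((Frows S).foldl bStep PySem.Dict.empty).keys.Nodup := by
  rw [foldl_bStep_eq]
  exact PySem.Dict.nodup_keys_foldl_insert_key _ _ _ _ PySem.Dict.nodup_keys_empty

theorem rows_get? (S : List (Int × Int)) (y : Int) (hy : -6 ≤ y ∧ y ≤ 6) :
    ((Frows S).foldl bStep PySem.Dict.empty).get? y
      = ((S.filter (fun p => p.2 == y)).map (fun p => p.1)).foldl upd none := by
  rw [get?_foldl_bStep, filter_Frows S y hy, PySem.Dict.get?_empty]

theorem mem_keys_rows (S : List (Int × Int)) (y : Int) :
    y ∈ ((Frows S).foldl bStep PySem.Dict.empty).keys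
      ↔ ((-6 ≤ y ∧ y ≤ 6) ∧ S.filter (fun p => p.2 == y) ≠ []) := by
  rw [keys_rows, PySem.Set.mem_ofList, List.mem_map]
  constructor
  · rintro ⟨p, hp, rfl⟩
    unfold Frows at hp
    rw [List.mem_filter] at hp
    refine ⟨by simpa using hp.2, ?_⟩
    intro hemp
    have : p ∈ S.filter (fun q => q.2 == p.2) := by
      rw [List.mem_filter]; exact ⟨hp.1, by simp⟩
    simp [hemp] at this
  · rintro ⟨hy, hne⟩
    obtain ⟨p, hp⟩ := List.exists_mem_of_ne_nil _ hne
    rw [List.mem_filter] at hp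
    have hpy : p.2 = y := by simpa using hp.2
    exact ⟨p, by unfold Frows; rw [List.mem_filter]; exact ⟨hp.1, by simp [hpy, hy.1, hy.2]⟩, hpy⟩

theorem check_eq (S : List (Int × Int)) (y : Int) (hy : -6 ≤ y ∧ y ≤ 6)
    (hne : S.filter (fun p => p.2 == y) ≠ []) :
    (decide ((((Frows S).foldl bStep PySem.Dict.empty).getD y (0, 0, 0)).2.2 < 2)
      || decide ((((Frows S).foldl bStep PySem.Dict.empty).getD y (0, 0, 0)).2.1
          - (((Frows S).foldl bStep PySem.Dict.empty).getD y (0, 0, 0)).1 + 1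
          ≤ (((Frows S).foldl bStep PySem.Dict.empty).getD y (0, 0, 0)).2.2))
      = !rowBad S y := by
  obtain ⟨x, t, hxs⟩ : ∃ x t, (S.filter (fun p => p.2 == y)).map (fun p => p.1) = x :: t := by
    cases h : (S.filter (fun p => p.2 == y)).map (fun p => p.1) with
    | nil => exact absurd (by simpa using h) hne
    | cons a b => exact ⟨a, b, rfl⟩
  have hval : ((Frows S).foldl bStep PySem.Dict.empty).getD y (0, 0, 0)
      = (t.foldl min x, t.foldl max x, 1 + (t.length : Int)) := by
    apply PySem.Dict.getD_of_get?_eq_some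
    rw [rows_get? S y hy, hxs, foldl_upd_cons']
  rw [hval, rowBad]
  simp only [hxs, PySem.List.min?_id_cons, PySem.List.max?_id_cons]
  rw [Bool.eq_iff_iff]
  have hlen : (x :: t).length = t.length + 1 := by simp
  simp only [Bool.or_eq_true, Bool.not_eq_true', Bool.and_eq_false_iff, decide_eq_true_eq,
    decide_eq_false_iff_not, hlen]
  constructor
  · rintro (h | h) <;> [left; right] <;> push_cast <;> omega
  · rintro (h | h) <;> [left; right] <;> push_cast at * <;> omega

theorem rowBad_of_empty (S : List (Int × Int)) (y : Int)
    (hne : S.filter (fun p => p.2 == y) = []) : rowBad S y = false := by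
  rw [rowBad]
  have h0 : PySem.List.min? ([] : List Int) (fun x => x) = none :=
    (PySem.List.min?_eq_none_iff _ _).mpr rfl
  simp [hne, h0]

theorem main (S : List (Int × Int)) : is_y_convex S = is_y_convex_alt S := by
  rw [is_y_convex, loop_eq_all, is_y_convex_alt]
  show _ = ((Frows S).foldl bStep PySem.Dict.empty).values.all _
  rw [PySem.Dict.values_eq_map_keys _ (nodup_keys_rows S) (0, 0, 0), List.all_map]
  rw [Bool.eq_iff_iff, List.all_eq_true, List.all_eq_true]
  simp only [Function.comp]
  constructor
  · intro h y hk
    obtain ⟨hy, hne⟩ := (mem_keys_rows S y).1 hk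
    rw [check_eq S y hy hne]
    exact h y ((PySem.List.mem_pyRange_one).2 ⟨hy.1, by omega⟩)
  · intro h y hyr
    obtain ⟨hy1, hy2⟩ := (PySem.List.mem_pyRange_one).1 hyr
    by_cases hne : S.filter (fun p => p.2 == y) = []
    · simp [rowBad_of_empty S y hne]
    · have hk : y ∈ ((Frows S).foldl bStep PySem.Dict.empty).keys :=
        (mem_keys_rows S y).2 ⟨⟨hy1, by omega⟩, hne⟩
      have := h y hk
      rwa [check_eq S y ⟨hy1, by omega⟩ hne] at this

-- ===== VERDICT (by name: the statement is the Claim_ definition above) =====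
theorem is_y_convex_spec : Claim_equal_is_y_convex := by
  intro S _
  unfold Spec_is_y_convex
  exact main S
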